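-- pv_equiv track=rewrite | github.com/WCwancheng/Python- | SafeSortNum.py | exchangeHead
-- ===== SOURCE A (Python) =====
-- def exchangeHead(number,index):
--     head = number[index-1]
--     for i in range(len(number)-1,0,-1):
--         if head < number[i]:
--             number[index-1] = number[i]
--             number[i] = head
--             break
--     return number
-- ===== SOURCE B (Python) =====
-- def _last_gt(number, head, lo, hi):
--     # divide and conquer: last index i in [lo, hi) with number[i] > head, or None
--     if hi - lo <= 0:
--         return None
--     if hi - lo == 1:
--         return lo if head < number[lo] else None
--     mid = (lo + hi) // 2
--     r = _last_gt(number, head, mid, hi)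
--     return r if r is not None else _last_gt(number, head, lo, mid)
--
--
-- def exchangeHead(number, index):
--     head = number[index - 1]
--     p = _last_gt(number, head, 1, len(number))
--     if p is not None:
--         number[index - 1] = number[p]
--         number[p] = head
--     return number
-- ===== Notes on version B (the rewrite author's own statement) =====
-- stated objective: alternative
-- what changed: B locates the highest index whose value exceeds the head by a divide-and-conquer recursion over index ranges (prefer the right half), then performs the single swap, instead of A's backward linear scan with an early break.
import Mathlib
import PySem

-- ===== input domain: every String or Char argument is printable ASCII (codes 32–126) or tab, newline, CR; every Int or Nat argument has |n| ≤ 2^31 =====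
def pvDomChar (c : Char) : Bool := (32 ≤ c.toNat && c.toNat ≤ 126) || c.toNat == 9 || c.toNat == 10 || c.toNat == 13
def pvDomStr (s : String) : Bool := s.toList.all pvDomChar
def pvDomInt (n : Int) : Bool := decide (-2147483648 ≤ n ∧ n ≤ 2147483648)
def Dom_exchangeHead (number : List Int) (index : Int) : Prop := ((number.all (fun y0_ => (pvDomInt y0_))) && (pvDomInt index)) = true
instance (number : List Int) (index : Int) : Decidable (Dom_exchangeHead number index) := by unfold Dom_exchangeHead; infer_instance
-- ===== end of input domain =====

-- ===== PORT A =====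
-- A scans i = len-1 .. 1 backwards, swaps head with the first (i.e. highest-index) element
-- greater than head, and breaks.  (Both A and B mutate the argument list in place the same
-- way; the equivalence proved here is about the returned list.)
def exchangeHeadLoopA (number : List Int) (head : Int) (j : Nat) : List Int → List Int
  | [] => number
  | i :: rest =>
    match PySem.List.pyGet? number i with
    | none => exchangeHeadLoopA number head j rest  -- unreachable: i from range(len-1,0,-1) is valid
    | some v =>
      if head < v then (number.set j v).set i.toNat head
      else exchangeHeadLoopA number head j rest

def exchangeHead (number : List Int) (index : Int) : List Int :=
  match PySem.List.pyGet? number (index - 1) with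
  | none => []  -- Python raises IndexError here; excluded by Pre_
  | some head =>
    let j : Nat := (if index - 1 < 0 then index - 1 + number.length else index - 1).toNat
    exchangeHeadLoopA number head j (PySem.List.pyRange ((number.length : Int) - 1) 0 (-1))

-- ===== PORT B =====
-- B: divide and conquer on the index range [lo, hi): the last index with number[i] > head,
-- preferring the right half; then one swap.
def lastGtB (number : List Int) (head : Int) (lo hi : Int) : Option Int :=
  if hi - lo ≤ 0 then none
  else if hi - lo = 1 then
    match PySem.List.pyGet? number lo with
    | none => none  -- unreachable totality guard: lo is a valid index whenever called
    | some v => if head < v then some lo else none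
  else
    let mid := PySem.Int.floordiv (lo + hi) 2
    match lastGtB number head mid hi with
    | some r => some r
    | none => lastGtB number head lo mid
termination_by (hi - lo).toNat
decreasing_by
  · have h1 : lo + 1 ≤ PySem.Int.floordiv (lo + hi) 2 :=
      (PySem.Int.le_floordiv_iff_mul_le (by omega)).mpr (by omega)
    omega
  · have h2 : PySem.Int.floordiv (lo + hi) 2 < hi :=
      (PySem.Int.floordiv_lt_iff_lt_mul (by omega)).mpr (by omega)
    omega

def exchangeHead_alt (number : List Int) (index : Int) : List Int :=
  match PySem.List.pyGet? number (index - 1) with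
  | none => []  -- Python raises IndexError here; excluded by Pre_
  | some head =>
    match lastGtB number head 1 (number.length : Int) with
    | none => number
    | some p =>
      let j : Nat := (if index - 1 < 0 then index - 1 + number.length else index - 1).toNat
      match PySem.List.pyGet? number p with
      | none => []  -- unreachable
      | some v => (number.set j v).set p.toNat head

-- ===== PRECONDITION & SPEC =====
-- Pre_ excludes exactly the inputs where number[index-1] raises IndexError.
def Pre_exchangeHead (number : List Int) (index : Int) : Prop :=
  -(number.length : Int) ≤ index - 1 ∧ index - 1 < (number.length : Int)
instance (number : List Int) (index : Int) : Decidable (Pre_exchangeHead number index) := by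
  unfold Pre_exchangeHead; infer_instance
def pvWitness_exchangeHead : List Int × Int := ([3, 1, 4, 1, 5], 1)

def Spec_exchangeHead (number : List Int) (index : Int) (out : List Int) : Prop := out = exchangeHead_alt number index
instance (number : List Int) (index : Int) (out : List Int) : Decidable (Spec_exchangeHead number index out) := by unfold Spec_exchangeHead; infer_instance

-- ===== CLAIM (what is proved, stated in full; the proofs are below) =====
def Claim_equal_exchangeHead : Prop := ∀ (number : List Int) (index : Int), Dom_exchangeHead number index → Pre_exchangeHead number index → Spec_exchangeHead number index (exchangeHead number index)

-- ===== LEMMAS AND PROOFS =====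

-- A's loop is find?-then-swap on its index list.
theorem loopA_eq_find (number : List Int) (head : Int) (j : Nat) (l : List Int) :
    exchangeHeadLoopA number head j l
    = match l.find? (fun i =>
        match PySem.List.pyGet? number i with
        | none => false
        | some v => decide (head < v)) with
      | none => number
      | some i =>
        match PySem.List.pyGet? number i with
        | none => number
        | some v => (number.set j v).set i.toNat head := by
  induction l with
  | nil => simp [exchangeHeadLoopA]
  | cons i rest ih =>
    simp only [exchangeHeadLoopA]
    cases hg : PySem.List.pyGet? number i with
    | none => simpa [List.find?, hg] using ih
    | some v =>
      by_cases hv : head < v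
      · simp [List.find?, hg, hv]
      · simp [List.find?, hg, hv, ih]

-- B's divide and conquer computes the first match of the reversed forward range.
theorem lastGtB_eq_find (number : List Int) (head : Int) (lo hi : Int) :
    lastGtB number head lo hi
    = (PySem.List.pyRange lo hi 1).reverse.find? (fun i =>
        match PySem.List.pyGet? number i with
        | none => false
        | some v => decide (head < v)) := by
  fun_induction lastGtB number head lo hi with
  | case1 lo hi h =>
    rw [PySem.List.pyRange_one_eq_nil (by omega)]; simp
  | case2 lo hi h h1 hg =>
    have : hi = lo + 1 := by omega
    subst this
    rw [PySem.List.pyRange_one_singleton]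
    simp [List.find?, hg]
  | case3 lo hi h h1 v hg hv =>
    have : hi = lo + 1 := by omega
    subst this
    rw [PySem.List.pyRange_one_singleton]
    simp [hg, hv]
  | case4 lo hi h h1 v hg hv =>
    have : hi = lo + 1 := by omega
    subst this
    rw [PySem.List.pyRange_one_singleton]
    simp [List.find?, hg, hv]
  | case5 lo hi h h1 mid r heq ih1 =>
    have hmid1 : lo + 1 ≤ PySem.Int.floordiv (lo + hi) 2 :=
      (PySem.Int.le_floordiv_iff_mul_le (by omega)).mpr (by omega)
    have hmid2 : PySem.Int.floordiv (lo + hi) 2 < hi :=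
      (PySem.Int.floordiv_lt_iff_lt_mul (by omega)).mpr (by omega)
    rw [PySem.List.pyRange_one_append lo (PySem.Int.floordiv (lo + hi) 2) hi (by omega) (by omega),
      List.reverse_append, List.find?_append, ← ih1, heq]
    simp
  | case6 lo hi h h1 mid heq ihR ihL =>
    have hmid1 : lo + 1 ≤ PySem.Int.floordiv (lo + hi) 2 :=
      (PySem.Int.le_floordiv_iff_mul_le (by omega)).mpr (by omega)
    have hmid2 : PySem.Int.floordiv (lo + hi) 2 < hi :=
      (PySem.Int.floordiv_lt_iff_lt_mul (by omega)).mpr (by omega)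
    rw [PySem.List.pyRange_one_append lo (PySem.Int.floordiv (lo + hi) 2) hi (by omega) (by omega),
      List.reverse_append, List.find?_append, ← ihR, heq, ihL]
    simp only [Option.none_or]
    rfl

-- ===== VERDICT (by name: the statement is the Claim_ definition above) =====
theorem exchangeHead_spec : Claim_equal_exchangeHead := by
  intro number index _hdom hpre
  unfold Spec_exchangeHead exchangeHead exchangeHead_alt
  cases hget : PySem.List.pyGet? number (index - 1) with
  | none =>
    exfalso
    obtain ⟨h1, h2⟩ := hpre
    rw [PySem.List.pyGet?_eq_none_iff] at hget
    exact hget ⟨h1, h2⟩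
  | some head =>
    simp only
    rw [loopA_eq_find, lastGtB_eq_find,
      show PySem.List.pyRange ((number.length : Int) - 1) 0 (-1)
          = (PySem.List.pyRange 1 (number.length : Int) 1).reverse from by
        rw [PySem.List.pyRange_neg_one_eq_reverse]; norm_num]
    cases hfind : (PySem.List.pyRange 1 (number.length : Int) 1).reverse.find? (fun i =>
        match PySem.List.pyGet? number i with
        | none => false
        | some v => decide (head < v)) with
    | none => simp
    | some p =>
      have hmem : p ∈ (PySem.List.pyRange 1 (number.length : Int) 1).reverse :=
        List.mem_of_find?_eq_some hfind
      rw [List.mem_reverse, PySem.List.mem_pyRange_one] at hmem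
      cases hgp : PySem.List.pyGet? number p with
      | none =>
        exfalso
        rw [PySem.List.pyGet?_eq_none_iff] at hgp
        exact hgp ⟨by omega, by omega⟩
      | some v => simp [hgp]
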